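-- pv_equiv track=rewrite | github.com/google/fedjax | fedjax/experimental/client_datasets.py | _pick_final_batch_size
-- ===== SOURCE A (Python) =====
-- def _pick_final_batch_size(data_size: int, batch_size: int,
--                            num_batch_size_buckets: int) -> int:
--   """Picks the final batch size for a given dataset size."""
--   # Determine the batch size for the final batch.
--   final_batch_size = data_size % batch_size
--   if final_batch_size == 0:
--     # No padding necessary.
--     return batch_size
--   # final_batch_size in [1, batch_size)
--   high, low, n = batch_size, batch_size // 2, 1
--   # Find low < final_batch_size <= high
--   while low >= final_batch_size and n < num_batch_size_buckets:
--     high, low, n = low, low // 2, n + 1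
--   return high
-- ===== SOURCE B (Python) =====
-- def _pick_final_batch_size(data_size: int, batch_size: int,
--                            num_batch_size_buckets: int) -> int:
--   """Picks the final batch size for a given dataset size (closed form).
--
--   Instead of halving batch_size step by step, compute the number of
--   halvings directly: the loop halves while floor(B/2^k) >= f, i.e. while
--   2^k <= B // f, so the uncapped count is (B // f).bit_length() - 1,
--   then cap it by num_batch_size_buckets - 1.
--   """
--   final_batch_size = data_size % batch_size
--   if final_batch_size == 0:
--     return batch_size
--   k = (batch_size // final_batch_size).bit_length() - 1
--   k = min(k, num_batch_size_buckets - 1)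
--   if k <= 0:
--     return batch_size
--   return batch_size >> k
-- ===== Notes on version B (the rewrite author's own statement) =====
-- stated objective: simpler
-- what changed: The bucket-halving while loop is replaced by a closed-form computation: the number of halvings is (batch_size // final_batch_size).bit_length() - 1, capped at num_batch_size_buckets - 1, and the result is a single right shift.
-- outside the precondition, e.g. on _pick_final_batch_size(5, -3, 4): A returns -3, B returns -2; on _pick_final_batch_size(5, 0, 4): A raises ZeroDivisionError, B raises ZeroDivisionError
import Mathlib
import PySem

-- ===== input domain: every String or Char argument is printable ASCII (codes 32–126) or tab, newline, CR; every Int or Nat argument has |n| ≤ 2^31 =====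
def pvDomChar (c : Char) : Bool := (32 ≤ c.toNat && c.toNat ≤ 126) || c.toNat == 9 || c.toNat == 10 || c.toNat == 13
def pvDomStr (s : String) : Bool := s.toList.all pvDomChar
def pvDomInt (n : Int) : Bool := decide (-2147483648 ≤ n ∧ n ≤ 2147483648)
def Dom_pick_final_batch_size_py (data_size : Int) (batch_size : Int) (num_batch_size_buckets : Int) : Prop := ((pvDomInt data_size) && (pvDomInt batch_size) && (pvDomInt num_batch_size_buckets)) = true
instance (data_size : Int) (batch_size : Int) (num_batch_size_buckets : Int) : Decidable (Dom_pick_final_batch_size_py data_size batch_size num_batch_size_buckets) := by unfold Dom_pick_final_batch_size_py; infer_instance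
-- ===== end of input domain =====

-- B replaces A's halving loop by a closed-form bit_length/shift computation of the
-- number of halvings (objective: simpler; no asymptotic change on these small loop counts).

-- ===== PORT A =====
-- the while loop: state (high, low, n); continues while low >= final_batch_size and n < num_batch_size_buckets
def pickLoopA (f : Int) (buckets : Int) (high low n : Int) : Int :=
  if h : low ≥ f ∧ n < buckets then
    pickLoopA f buckets low (PySem.Int.floordiv low 2) (n + 1)
  else
    high
termination_by (buckets - n).toNat
decreasing_by omega

def pick_final_batch_size_py (data_size : Int) (batch_size : Int) (num_batch_size_buckets : Int) : Int :=
  let final_batch_size := PySem.Int.mod data_size batch_size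
  if final_batch_size = 0 then
    batch_size
  else
    pickLoopA final_batch_size num_batch_size_buckets batch_size (PySem.Int.floordiv batch_size 2) 1

-- ===== PORT B =====
-- hand-ported primitives (exact on the admitted domain, 1 ≤ batch_size, so the arguments are ≥ 1):
-- Python n.bit_length() for n ≥ 1 is Nat.log2 n + 1; Python 'b >> k' for k ≥ 0 is floor(b / 2^k).
def pick_final_batch_size_py_alt (data_size : Int) (batch_size : Int) (num_batch_size_buckets : Int) : Int :=
  let final_batch_size := PySem.Int.mod data_size batch_size
  if final_batch_size = 0 then
    batch_size
  else
    let k : Int := ((Nat.log2 (PySem.Int.floordiv batch_size final_batch_size).toNat + 1 : Nat) : Int) - 1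
    let k := min k (num_batch_size_buckets - 1)
    if k ≤ 0 then batch_size
    else PySem.Int.floordiv batch_size (2 ^ k.toNat)

-- ===== PRECONDITION & SPEC =====
-- Pre_ excludes batch_size = 0 (A raises ZeroDivisionError) and negative batch_size
-- with a nonzero remainder and at least two buckets, which is outside the natural domain
-- of a batch-size picker (B's bit_length/shift closed form is for positive sizes and does
-- not reproduce A's halving of a negative size); a negative batch_size is kept where no
-- halving can happen (it divides data_size, or there are no buckets to halve into).
def Pre_pick_final_batch_size_py (data_size : Int) (batch_size : Int) (num_batch_size_buckets : Int) : Prop :=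
  1 ≤ batch_size ∨ (batch_size ≠ 0 ∧ (batch_size ∣ data_size ∨ num_batch_size_buckets ≤ 1))
instance (data_size : Int) (batch_size : Int) (num_batch_size_buckets : Int) : Decidable (Pre_pick_final_batch_size_py data_size batch_size num_batch_size_buckets) := by unfold Pre_pick_final_batch_size_py; infer_instance

def pvWitness_pick_final_batch_size_py : Int × Int × Int := (10, 4, 3)

def Spec_pick_final_batch_size_py (data_size : Int) (batch_size : Int) (num_batch_size_buckets : Int) (out : Int) : Prop := out = pick_final_batch_size_py_alt data_size batch_size num_batch_size_buckets
instance (data_size : Int) (batch_size : Int) (num_batch_size_buckets : Int) (out : Int) : Decidable (Spec_pick_final_batch_size_py data_size batch_size num_batch_size_buckets out) := by unfold Spec_pick_final_batch_size_py; infer_instance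

-- ===== CLAIM (what is proved, stated in full; the proofs are below) =====
def Claim_equal_pick_final_batch_size_py : Prop := ∀ (data_size : Int) (batch_size : Int) (num_batch_size_buckets : Int), Dom_pick_final_batch_size_py data_size batch_size num_batch_size_buckets → Pre_pick_final_batch_size_py data_size batch_size num_batch_size_buckets → Spec_pick_final_batch_size_py data_size batch_size num_batch_size_buckets (pick_final_batch_size_py data_size batch_size num_batch_size_buckets)

-- ===== LEMMAS AND PROOFS =====

-- f still fits after j halvings of b  iff  j is at most log2(b // f)
theorem le_ediv_pow_iff_le_log2 (b f : Int) (hf : 0 < f) (hfb : f ≤ b) (j : Nat) :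
    f ≤ b / 2 ^ j ↔ j ≤ Nat.log2 (b / f).toNat := by
  have h2 : (0:Int) < 2 ^ j := by positivity
  have h1 : f ≤ b / 2 ^ j ↔ f * 2 ^ j ≤ b := Int.le_ediv_iff_mul_le h2
  have h3 : (2:Int) ^ j ≤ b / f ↔ 2 ^ j * f ≤ b := Int.le_ediv_iff_mul_le hf
  have hm1 : (1:Int) ≤ b / f := by rw [Int.le_ediv_iff_mul_le hf]; omega
  have hm0 : ((b / f).toNat : Int) = b / f := Int.toNat_of_nonneg (by omega)
  have hlog : Nat.log2 (b / f).toNat < j ↔ (b / f).toNat < 2 ^ j :=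
    Nat.log2_lt (by omega)
  have hcast : ((2:Nat) ^ j ≤ (b / f).toNat) ↔ (2:Int) ^ j ≤ b / f := by
    rw [← hm0]; exact_mod_cast Iff.rfl
  rw [h1, ← Nat.not_lt, hlog, Nat.not_lt, hcast, h3, mul_comm]

-- the halving loop, characterised in closed form
theorem pickLoopA_eq (b f buckets : Int) (hf : 0 < f) (hfb : f ≤ b) :
    ∀ (fuel : Nat) (k : Nat) (n : Int), fuel = (buckets - n).toNat →
      k ≤ Nat.log2 (b / f).toNat →
      pickLoopA f buckets (b / 2 ^ k) (b / 2 ^ (k + 1)) n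
        = b / 2 ^ (k + min (Nat.log2 (b / f).toNat - k) fuel) := by
  intro fuel
  induction fuel with
  | zero =>
    intro k n hfuel hk
    rw [pickLoopA, dif_neg (by omega)]
    simp
  | succ m ih =>
    intro k n hfuel hk
    by_cases hlow : f ≤ b / 2 ^ (k + 1)
    · have hk1 : k + 1 ≤ Nat.log2 (b / f).toNat :=
        (le_ediv_pow_iff_le_log2 b f hf hfb (k + 1)).mp hlow
      rw [pickLoopA, dif_pos ⟨hlow, by omega⟩]
      have hstep : PySem.Int.floordiv (b / 2 ^ (k + 1)) 2 = b / 2 ^ (k + 1 + 1) := by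
        rw [PySem.Int.floordiv_eq_ediv_of_pos (by norm_num),
            Int.ediv_ediv_of_nonneg (by positivity)]
        congr 1
      rw [hstep, ih (k + 1) (n + 1) (by omega) hk1]
      have hexp : k + 1 + min (Nat.log2 (b / f).toNat - (k + 1)) m
          = k + min (Nat.log2 (b / f).toNat - k) (m + 1) := by omega
      rw [hexp]
    · have hk1 : Nat.log2 (b / f).toNat < k + 1 := by
        by_contra hc
        exact hlow ((le_ediv_pow_iff_le_log2 b f hf hfb (k + 1)).mpr (by omega))
      rw [pickLoopA, dif_neg (fun h => hlow h.1)]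
      have hexp : k + min (Nat.log2 (b / f).toNat - k) (m + 1) = k := by omega
      rw [hexp]

-- ===== VERDICT (by name: the statement is the Claim_ definition above) =====
theorem pick_final_batch_size_py_spec : Claim_equal_pick_final_batch_size_py := by
  intro d b buckets _ hpre
  unfold Spec_pick_final_batch_size_py
  unfold pick_final_batch_size_py pick_final_batch_size_py_alt
  set f := PySem.Int.mod d b with hfdef
  by_cases hf : f = 0
  · simp [hf]
  · by_cases hk1 : buckets ≤ 1
    · have hA1 : pickLoopA f buckets b (PySem.Int.floordiv b 2) 1 = b := by
        rw [pickLoopA, dif_neg (by omega)]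
      simp only [hf, hA1]
      rw [if_pos (by omega :
        min (((Nat.log2 (PySem.Int.floordiv b f).toNat + 1 : Nat) : Int) - 1) (buckets - 1) ≤ 0)]
    have hb : 0 < b := by
      rcases hpre with h | ⟨_, hdvd | hbk⟩
      · omega
      · exact absurd ((PySem.Int.mod_eq_zero_iff_dvd d b).mpr hdvd) hf
      · omega
    have hf0 : 0 < f := lt_of_le_of_ne (PySem.Int.mod_nonneg d hb) (Ne.symm hf)
    have hflt : f < b := PySem.Int.mod_lt d hb
    have hfb : f ≤ b := le_of_lt hflt
    set K := Nat.log2 (b / f).toNat with hKdef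
    have hA : pickLoopA f buckets b (PySem.Int.floordiv b 2) 1
        = b / 2 ^ (min K (buckets - 1).toNat) := by
      have h0 : b = b / 2 ^ (0:Nat) := by simp
      have h1 : PySem.Int.floordiv b 2 = b / 2 ^ (0 + 1 : Nat) := by
        rw [PySem.Int.floordiv_eq_ediv_of_pos (by norm_num)]; norm_num
      calc pickLoopA f buckets b (PySem.Int.floordiv b 2) 1
          = pickLoopA f buckets (b / 2 ^ (0:Nat)) (b / 2 ^ (0 + 1 : Nat)) 1 := by
            rw [← h0, ← h1]
        _ = b / 2 ^ (0 + min (K - 0) (buckets - 1).toNat) := by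
            exact pickLoopA_eq b f buckets hf0 hfb (buckets - 1).toNat 0 1 rfl (Nat.zero_le _)
        _ = b / 2 ^ (min K (buckets - 1).toNat) := by norm_num
    have hfd : PySem.Int.floordiv b f = b / f :=
      PySem.Int.floordiv_eq_ediv_of_pos hf0
    simp only [hf, hA, hfd, ← hKdef]
    have hKcast : ((Nat.log2 (b / f).toNat + 1 : Nat) : Int) - 1 = (K : Int) := by
      rw [← hKdef]; push_cast; ring
    rw [hKcast]
    by_cases hbk : min (K : Int) (buckets - 1) ≤ 0
    · rw [if_pos hbk]
      have : min K (buckets - 1).toNat = 0 := by omega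
      rw [this]; simp
    · rw [if_neg hbk]
      have hmin : (min (K : Int) (buckets - 1)).toNat = min K (buckets - 1).toNat := by
        omega
      rw [PySem.Int.floordiv_eq_ediv_of_pos (by positivity), hmin]
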